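-- pv_equiv track=rewrite | github.com/MOvalid/TIO | ACO/heuristic_function.py | gaps_penalty
-- ===== SOURCE A (Python) =====
-- from typing import List
--
-- def gaps_penalty(slots: List[str], penalty_short: int, penalty_long: int) -> int:
--     """
--     Oblicza karę za przerwy w harmonogramie dla danej listy slotów czasowych.
--     """
--     if not slots or len(slots) == 1:
--         return 0
--
--     slots = sorted(slots)
--     score = 0
--
--     for i in range(1, len(slots)):
--         prev_hour = int(slots[i - 1][:2])
--         curr_hour = int(slots[i][:2])
--         gap = curr_hour - prev_hour - 1
--
--         if gap == 1:
--             score += penalty_short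
--         elif gap > 1:
--             score += penalty_long * gap
--
--     return score
-- ===== SOURCE B (Python) =====
-- from typing import List
--
-- def gaps_penalty(slots: List[str], penalty_short: int, penalty_long: int) -> int:
--     if len(slots) < 2:
--         return 0
--     hours = {int(s[:2]) for s in slots}
--     lo = min(hours)
--     hi = max(hours)
--     score = 0
--     run = 0
--     for t in range(lo + 1, hi + 1):
--         if t in hours:
--             if run == 1:
--                 score += penalty_short
--             elif run > 1:
--                 score += penalty_long * run
--             run = 0
--         else:
--             run += 1
--     return score
-- ===== Notes on version B (the rewrite author's own statement) =====
-- stated objective: alternative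
-- what changed: B drops the sort-then-adjacent-pairs scan: it builds the set of occupied hours in one pass and walks the hour timeline from the minimum to the maximum occupied hour, accumulating the length of each run of missing hours and charging penalty_short for a run of 1 and penalty_long times the length for longer runs.
-- outside the precondition, e.g. on gaps_penalty(['19', '2 '], 1, 2): A returns 0, B returns 32
import Mathlib
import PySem

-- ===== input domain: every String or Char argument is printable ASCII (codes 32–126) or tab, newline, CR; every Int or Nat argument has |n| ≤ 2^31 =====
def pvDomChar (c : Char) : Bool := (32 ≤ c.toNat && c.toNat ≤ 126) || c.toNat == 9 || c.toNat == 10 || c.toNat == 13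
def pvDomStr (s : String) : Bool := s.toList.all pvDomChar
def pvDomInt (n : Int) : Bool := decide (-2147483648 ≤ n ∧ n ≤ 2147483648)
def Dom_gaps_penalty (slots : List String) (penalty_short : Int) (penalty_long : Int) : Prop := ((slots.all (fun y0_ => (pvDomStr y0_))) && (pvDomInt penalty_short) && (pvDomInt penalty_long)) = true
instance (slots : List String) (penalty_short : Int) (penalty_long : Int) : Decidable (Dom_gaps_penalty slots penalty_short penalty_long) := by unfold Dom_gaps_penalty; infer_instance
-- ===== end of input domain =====

-- B replaces sort-then-adjacent-pairs with one pass building the set of occupied hours plus a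
-- run-length walk of the hour timeline from min to max (objective: alternative algorithm).

-- ===== PORT A =====
-- int(slot[:2]); none exactly where Python's int() raises ValueError
def pvHour? (s : String) : Option Int := PySem.Int.ofChars? (PySem.List.slice s.toList none (some 2))
-- total version used inside the ports; the default 0 is unreachable under Pre_
def pvHourD (s : String) : Int := (pvHour? s).getD 0

def gaps_penalty (slots : List String) (penalty_short : Int) (penalty_long : Int) : Int :=
  if slots = [] ∨ slots.length = 1 then 0
  else
    let sl := PySem.List.sorted slots (fun x => x)
    (PySem.List.pyRange 1 (sl.length : Int)).foldl (fun score i =>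
      let prev_hour := pvHourD (PySem.List.pyGetD sl (i - 1) "")
      let curr_hour := pvHourD (PySem.List.pyGetD sl i "")
      let gap := curr_hour - prev_hour - 1
      if gap = 1 then score + penalty_short
      else if gap > 1 then score + penalty_long * gap
      else score) 0

-- ===== PORT B =====
def gaps_penalty_alt (slots : List String) (penalty_short : Int) (penalty_long : Int) : Int :=
  if slots.length < 2 then 0
  else
    let hours : PySem.Set Int := PySem.Set.ofList (slots.map pvHourD)
    let lo := (PySem.List.min? hours (fun x => x)).getD 0
    let hi := (PySem.List.max? hours (fun x => x)).getD 0
    ((PySem.List.pyRange (lo + 1) (hi + 1)).foldl (fun st t =>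
      if PySem.Set.contains hours t then
        (if st.2 = 1 then st.1 + penalty_short
         else if st.2 > 1 then st.1 + penalty_long * st.2
         else st.1, 0)
      else (st.1, st.2 + 1)) ((0 : Int), (0 : Int))).1

-- ===== PRECONDITION & SPEC =====
-- Pre_ excludes, for lists of ≥ 2 slots, (a) inputs where some slot's 2-char prefix is not
-- int-parseable — there A raises ValueError — and (b) inputs where the parsed hours disagree with
-- the lexicographic order of the slot strings (possible only for oddly formatted prefixes such as
-- '2 ' or '+5'), a defensible corner where A's pairwise gaps are an artefact of string sorting.
def Pre_gaps_penalty (slots : List String) (penalty_short : Int) (penalty_long : Int) : Prop :=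
  2 ≤ slots.length →
    ((∀ s ∈ slots, (pvHour? s).isSome = true) ∧
     (∀ s ∈ slots, ∀ t ∈ slots, ¬ (t.toList < s.toList) → pvHourD s ≤ pvHourD t))
instance (slots : List String) (penalty_short : Int) (penalty_long : Int) : Decidable (Pre_gaps_penalty slots penalty_short penalty_long) := by unfold Pre_gaps_penalty; infer_instance

def pvWitness_gaps_penalty : List String × Int × Int := (["08:00", "10:30", "08:15"], 2, 3)

def Spec_gaps_penalty (slots : List String) (penalty_short : Int) (penalty_long : Int) (out : Int) : Prop := out = gaps_penalty_alt slots penalty_short penalty_long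
instance (slots : List String) (penalty_short : Int) (penalty_long : Int) (out : Int) : Decidable (Spec_gaps_penalty slots penalty_short penalty_long out) := by unfold Spec_gaps_penalty; infer_instance

-- ===== CLAIM (what is proved, stated in full; the proofs are below) =====
def Claim_equal_gaps_penalty : Prop := ∀ (slots : List String) (penalty_short : Int) (penalty_long : Int), Dom_gaps_penalty slots penalty_short penalty_long → Pre_gaps_penalty slots penalty_short penalty_long → Spec_gaps_penalty slots penalty_short penalty_long (gaps_penalty slots penalty_short penalty_long)

-- ===== LEMMAS AND PROOFS =====

-- the gap/run penalty both loop bodies apply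
def pvPen (ps pl g : Int) : Int := if g = 1 then ps else if g > 1 then pl * g else 0

-- sum of penalties over adjacent pairs of a list of hours
def pvPairSum (ps pl : Int) : List Int → Int
  | a :: b :: t => pvPen ps pl (b - a - 1) + pvPairSum ps pl (b :: t)
  | _ => 0

-- remove adjacent duplicates
def pvDD : List Int → List Int
  | a :: b :: t => if a = b then pvDD (b :: t) else a :: pvDD (b :: t)
  | l => l

lemma pvPen_body (acc ps pl g : Int) :
    (if g = 1 then acc + ps else if g > 1 then acc + pl * g else acc) = acc + pvPen ps pl g := by
  unfold pvPen; split_ifs <;> simp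

lemma pvDD_mem (l : List Int) (x : Int) : x ∈ pvDD l ↔ x ∈ l := by
  match l with
  | [] => rfl
  | [a] => rfl
  | a :: b :: t =>
    unfold pvDD
    split_ifs with hab
    · subst hab; rw [pvDD_mem (a :: t) x]; simp
    · simp [pvDD_mem (b :: t) x]

lemma pvDD_cons (a : Int) (t : List Int) : ∃ m, pvDD (a :: t) = a :: m := by
  induction t generalizing a with
  | nil => exact ⟨[], rfl⟩
  | cons b t ih =>
    unfold pvDD
    split_ifs with hab
    · subst hab; exact ih a
    · exact ⟨pvDD (b :: t), rfl⟩

lemma pvDD_chain (l : List Int) (h : l.IsChain (· ≤ ·)) : (pvDD l).IsChain (· < ·) := by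
  match l with
  | [] => exact .nil
  | [a] => exact .singleton a
  | a :: b :: t =>
    rw [List.isChain_cons_cons] at h
    unfold pvDD
    split_ifs with hab
    · exact pvDD_chain (b :: t) h.2
    · obtain ⟨m, hm⟩ := pvDD_cons b t
      rw [hm]
      rw [List.isChain_cons_cons]
      refine ⟨lt_of_le_of_ne h.1 hab, ?_⟩
      rw [← hm]; exact pvDD_chain (b :: t) h.2

lemma pvPairSum_pvDD (ps pl : Int) (l : List Int) (h : l.IsChain (· ≤ ·)) :
    pvPairSum ps pl l = pvPairSum ps pl (pvDD l) := by
  match l with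
  | [] => rfl
  | [a] => rfl
  | a :: b :: t =>
    rw [List.isChain_cons_cons] at h
    unfold pvDD
    split_ifs with hab
    · subst hab
      show pvPen ps pl (a - a - 1) + pvPairSum ps pl (a :: t) = _
      rw [pvPairSum_pvDD ps pl (a :: t) h.2]
      simp [pvPen]
    · obtain ⟨m, hm⟩ := pvDD_cons b t
      rw [hm]
      show pvPen ps pl (b - a - 1) + pvPairSum ps pl (b :: t) = _
      show _ = pvPairSum ps pl (a :: b :: m)
      have h2 := pvPairSum_pvDD ps pl (b :: t) h.2
      rw [hm] at h2
      rw [h2]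
      rfl

lemma pvChain_lt_of_mem {y z : Int} {e : List Int} (h : (y :: e).IsChain (· < ·)) (hz : z ∈ e) :
    y < z :=
  List.rel_of_pairwise_cons (List.isChain_iff_pairwise.mp h) hz

lemma pvGetLastD_mem (a d : Int) (t : List Int) : (a :: t).getLastD d ∈ a :: t := by
  induction t generalizing a with
  | nil => simp
  | cons b t ih =>
    rw [List.getLastD_cons]
    exact List.mem_cons_of_mem a (ih b)

lemma pvLe_getLastD_of_mem {d x : Int} {e : List Int} (h : (d :: e).IsChain (· < ·))
    (hx : x ∈ d :: e) : x ≤ (d :: e).getLastD 0 := by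
  induction e generalizing d x with
  | nil => simp_all
  | cons b t ih =>
    rw [List.isChain_cons_cons] at h
    rw [List.getLastD_cons]
    rcases List.mem_cons.mp hx with hx | hx
    · subst hx
      exact le_trans h.1.le (ih h.2 (List.mem_cons_self))
    · exact ih h.2 hx

lemma pvFoldA (ps pl : Int) : ∀ (t pre : List String) (x : String) (acc : Int),
    (PySem.List.pyRange ((pre.length : Int) + 1) (((pre ++ x :: t).length : Int))).foldl
      (fun score i =>
        if pvHourD (PySem.List.pyGetD (pre ++ x :: t) i "") -
             pvHourD (PySem.List.pyGetD (pre ++ x :: t) (i - 1) "") - 1 = 1 then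
          score + ps
        else if pvHourD (PySem.List.pyGetD (pre ++ x :: t) i "") -
             pvHourD (PySem.List.pyGetD (pre ++ x :: t) (i - 1) "") - 1 > 1 then
          score + pl * (pvHourD (PySem.List.pyGetD (pre ++ x :: t) i "") -
             pvHourD (PySem.List.pyGetD (pre ++ x :: t) (i - 1) "") - 1)
        else score) acc
    = acc + pvPairSum ps pl ((x :: t).map pvHourD) := by
  intro t
  induction t with
  | nil =>
    intro pre x acc
    rw [show ((pre ++ [x]).length : Int) = (pre.length : Int) + 1 by simp]
    rw [PySem.List.pyRange_one_eq_nil (le_refl _)]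
    simp [pvPairSum]
  | cons y t2 ih =>
    intro pre x acc
    have hlt : (pre.length : Int) + 1 < ((pre ++ x :: y :: t2).length : Int) := by
      simp
    rw [PySem.List.pyRange_one_cons hlt, List.foldl_cons]
    have hprev : PySem.List.pyGetD (pre ++ x :: y :: t2) ((pre.length : Int) + 1 - 1) "" = x := by
      rw [show (pre.length : Int) + 1 - 1 = (pre.length : Int) by ring]
      show (PySem.List.pyGet? (pre ++ x :: y :: t2) (pre.length : Int)).getD "" = x
      rw [PySem.List.pyGet?_append_length]
      rfl
    have hcurr : PySem.List.pyGetD (pre ++ x :: y :: t2) ((pre.length : Int) + 1) "" = y := by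
      rw [show pre ++ x :: y :: t2 = (pre ++ [x]) ++ y :: t2 by simp,
          show (pre.length : Int) + 1 = (((pre ++ [x]).length : Int)) by simp]
      show (PySem.List.pyGet? _ _).getD "" = y
      rw [PySem.List.pyGet?_append_length]
      rfl
    rw [hprev, hcurr, pvPen_body]
    have happ : pre ++ x :: y :: t2 = (pre ++ [x]) ++ y :: t2 := by simp
    rw [show (pre.length : Int) + 1 + 1 = (((pre ++ [x]).length : Int)) + 1 by simp]
    rw [happ]
    rw [ih (pre ++ [x]) y (acc + pvPen ps pl (pvHourD y - pvHourD x - 1))]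
    rw [show pvPairSum ps pl (List.map pvHourD (x :: y :: t2)) =
        pvPen ps pl (pvHourD y - pvHourD x - 1) + pvPairSum ps pl (List.map pvHourD (y :: t2)) from rfl]
    ring

def pvWalkBody (S : List Int) (ps pl : Int) (st : Int × Int) (t : Int) : Int × Int :=
  if PySem.Set.contains S t then
    (if st.2 = 1 then st.1 + ps else if st.2 > 1 then st.1 + pl * st.2 else st.1, 0)
  else (st.1, st.2 + 1)

lemma pvWalk_skip (S : List Int) (ps pl : Int) :
    ∀ (n : Nat) (a : Int) (score run : Int),
      (∀ t, a ≤ t → t < a + n → PySem.Set.contains S t = false) →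
      (PySem.List.pyRange a (a + n)).foldl (pvWalkBody S ps pl) (score, run)
        = (score, run + n) := by
  intro n
  induction n with
  | zero =>
    intro a score run _
    rw [show a + ((0 : Nat) : Int) = a by simp, PySem.List.pyRange_one_eq_nil (le_refl _)]
    simp
  | succ n ih =>
    intro a score run h
    have hlt : a < a + ((n + 1 : Nat) : Int) := by push_cast; omega
    rw [PySem.List.pyRange_one_cons hlt, List.foldl_cons]
    have hfa : PySem.Set.contains S a = false := h a (le_refl _) (by push_cast; omega)
    rw [show pvWalkBody S ps pl (score, run) a = (score, run + 1) by
      unfold pvWalkBody; rw [hfa]; simp]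
    rw [show a + ((n + 1 : Nat) : Int) = (a + 1) + (n : Int) by push_cast; ring]
    rw [ih (a + 1) score (run + 1) (fun t h1 h2 => h t (by omega) (by push_cast at h2 ⊢; omega))]
    rw [show run + 1 + (n : Int) = run + ((n + 1 : Nat) : Int) by push_cast; ring]

lemma pvGetLastD_irrel (a d d' : Int) (t : List Int) :
    (a :: t).getLastD d = (a :: t).getLastD d' := by
  induction t generalizing a with
  | nil => rfl
  | cons b t ih => simp only [List.getLastD_cons]

lemma pvWalk_main (S : List Int) (ps pl : Int) :
    ∀ (e : List Int) (d : Int) (score : Int),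
      (d :: e).IsChain (· < ·) →
      (∀ t : Int, d < t → (PySem.Set.contains S t = true ↔ t ∈ e)) →
      (PySem.List.pyRange (d + 1) ((d :: e).getLastD 0 + 1)).foldl (pvWalkBody S ps pl) (score, 0)
        = (score + pvPairSum ps pl (d :: e), 0) := by
  intro e
  induction e with
  | nil =>
    intro d score _ _
    rw [show ([d] : List Int).getLastD 0 = d from rfl, PySem.List.pyRange_one_eq_nil (le_refl _)]
    simp [pvPairSum]
  | cons y e' ih =>
    intro d score hch hmem
    rw [List.isChain_cons_cons] at hch
    have hdy : d < y := hch.1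
    have hyL : y ≤ (y :: e').getLastD 0 := by
      have := pvGetLastD_mem y 0 e'
      rcases List.mem_cons.mp this with h | h
      · omega
      · exact (pvChain_lt_of_mem hch.2 h).le
    rw [List.getLastD_cons, pvGetLastD_irrel y d 0 e']
    rw [PySem.List.pyRange_one_append (d + 1) y ((y :: e').getLastD 0 + 1) (by omega) (by omega)]
    rw [List.foldl_append]
    have hskip : ∀ t, d + 1 ≤ t → t < (d + 1) + ((y - (d + 1)).toNat : Int) →
        PySem.Set.contains S t = false := by
      intro t h1 h2
      have h2' : t < y := by omega
      rw [← Bool.not_eq_true]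
      intro hc
      rcases List.mem_cons.mp ((hmem t (by omega)).mp hc) with h | h
      · omega
      · exact absurd (pvChain_lt_of_mem hch.2 h) (by omega)
    have hy' : y = (d + 1) + ((y - (d + 1)).toNat : Int) := by omega
    rw [show PySem.List.pyRange (d + 1) y
        = PySem.List.pyRange (d + 1) ((d + 1) + ((y - (d + 1)).toNat : Int)) by rw [← hy']]
    rw [pvWalk_skip S ps pl ((y - (d + 1)).toNat) (d + 1) score 0 hskip]
    rw [PySem.List.pyRange_one_cons (by omega : y < (y :: e').getLastD 0 + 1), List.foldl_cons]
    have hcy : PySem.Set.contains S y = true := (hmem y (by omega)).mpr (by simp)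
    have hrun : (0 : Int) + ((y - (d + 1)).toNat : Int) = y - d - 1 := by omega
    rw [show pvWalkBody S ps pl (score, 0 + ((y - (d + 1)).toNat : Int)) y
        = (score + pvPen ps pl (y - d - 1), 0) by
      unfold pvWalkBody
      rw [hcy, hrun]
      simp only [if_true]
      rw [pvPen_body score ps pl (y - d - 1)]]
    have hmem' : ∀ t : Int, y < t → (PySem.Set.contains S t = true ↔ t ∈ e') := by
      intro t ht
      rw [hmem t (by omega)]
      constructor
      · intro h
        rcases List.mem_cons.mp h with h | h
        · omega
        · exact h
      · exact fun h => List.mem_cons_of_mem y h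
    rw [ih y (score + pvPen ps pl (y - d - 1)) hch.2 hmem']
    rw [show pvPairSum ps pl (d :: y :: e')
        = pvPen ps pl (y - d - 1) + pvPairSum ps pl (y :: e') from rfl]
    rw [add_assoc]

-- ===== VERDICT (by name: the statement is the Claim_ definition above) =====
theorem gaps_penalty_spec : Claim_equal_gaps_penalty := by
  intro slots ps pl _dom hpre
  unfold Spec_gaps_penalty
  by_cases hlen : 2 ≤ slots.length
  case neg =>
    have h0 : slots = [] ∨ slots.length = 1 := by
      rcases slots with _ | ⟨a, t⟩
      · exact Or.inl rfl
      · right; simp at hlen ⊢; omega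
    unfold gaps_penalty gaps_penalty_alt
    rw [if_pos h0, if_pos (by rcases h0 with h | h <;> simp [h])]
  case pos =>
    obtain ⟨-, hmono⟩ := hpre hlen
    have hperm := PySem.List.sorted_perm slots (fun x => x) false
    obtain ⟨x, t2, hsl⟩ : ∃ x t2, PySem.List.sorted slots (fun x => x) = x :: t2 := by
      cases h : PySem.List.sorted slots (fun x => x) with
      | nil =>
        exfalso
        have hl := hperm.length_eq
        rw [h] at hl
        simp at hl
        omega
      | cons a b => exact ⟨a, b, rfl⟩
    -- the (nondecreasing) hour sequence of the sorted slots
    have hchain : ((PySem.List.sorted slots (fun x => x)).map pvHourD).IsChain (· ≤ ·) := by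
      apply List.Pairwise.isChain
      rw [List.pairwise_map]
      apply List.Pairwise.imp_of_mem ?_ (PySem.List.sorted_pairwise slots (fun x => x))
      intro a b ha hb hab
      refine hmono a (hperm.subset ha) b (hperm.subset hb) (fun hlt => ?_)
      exact absurd hab (not_le.mpr (String.lt_iff_toList_lt.mpr hlt))
    -- A computes the pairwise penalty sum of that sequence
    have hA : gaps_penalty slots ps pl
        = pvPairSum ps pl ((PySem.List.sorted slots (fun x => x)).map pvHourD) := by
      unfold gaps_penalty
      rw [if_neg (by
        rintro (h | h)
        · rw [h] at hlen; simp at hlen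
        · omega)]
      rw [hsl, show (1 : Int) = ((([] : List String).length : Int) + 1) by simp]
      simpa using pvFoldA ps pl t2 [] x 0
    -- B computes the pairwise penalty sum of the deduplicated sequence
    set h : List Int := (PySem.List.sorted slots (fun x => x)).map pvHourD with hh
    obtain ⟨e', hdd⟩ := pvDD_cons (pvHourD x) (t2.map pvHourD)
    have hddh : pvDD h = pvHourD x :: e' := by rw [hh, hsl]; simpa using hdd
    set d : Int := pvHourD x with hd
    have echain : (d :: e').IsChain (· < ·) := by
      rw [← hddh]; exact pvDD_chain h hchain
    set hours : PySem.Set Int := PySem.Set.ofList (slots.map pvHourD) with hhours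
    have hmemP : ∀ t : Int, t ∈ (hours : List Int) ↔ t ∈ pvDD h := by
      intro t
      rw [hhours, PySem.Set.mem_ofList, pvDD_mem, hh, ← (hperm.map pvHourD).mem_iff]
    have hcont : ∀ t : Int, PySem.Set.contains hours t = true ↔ t ∈ d :: e' := by
      intro t
      rw [show PySem.Set.contains hours t = List.elem t hours from rfl, List.elem_iff,
        hmemP t, hddh]
    have hd_mem : d ∈ (hours : List Int) := (hmemP d).mpr (by rw [hddh]; simp)
    have hne : (hours : List Int) ≠ [] := List.ne_nil_of_mem hd_mem
    -- lo = d
    obtain ⟨m, hmin⟩ : ∃ m, PySem.List.min? hours (fun x => x) = some m := by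
      cases hm : PySem.List.min? (hours : List Int) (fun x => x) with
      | none => exact absurd ((PySem.List.min?_eq_none_iff _ _).mp hm) hne
      | some m => exact ⟨m, rfl⟩
    have hmd : m = d := by
      have h1 : d ≤ m := by
        have hm2 : m ∈ d :: e' := by rw [← hddh, ← hmemP]; exact PySem.List.min?_mem hmin
        rcases List.mem_cons.mp hm2 with h | h
        · omega
        · exact (pvChain_lt_of_mem echain h).le
      have h2 : m ≤ d := PySem.List.min?_isMin hmin d hd_mem
      omega
    -- hi = last of the deduplicated sequence
    obtain ⟨M, hmax⟩ : ∃ M, PySem.List.max? hours (fun x => x) = some M := by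
      cases hm : PySem.List.max? (hours : List Int) (fun x => x) with
      | none =>
        exfalso
        apply hne
        exact (PySem.List.max?_eq_none_iff _ _).mp hm
      | some M => exact ⟨M, rfl⟩
    have hML : M = (d :: e').getLastD 0 := by
      have hLmem : (d :: e').getLastD 0 ∈ (hours : List Int) := by
        rw [hmemP, hddh]; exact pvGetLastD_mem d 0 e'
      have h1 : M ≤ (d :: e').getLastD 0 := by
        apply pvLe_getLastD_of_mem echain
        rw [← hddh, ← hmemP]
        exact PySem.List.max?_mem hmax
      have h2 : (d :: e').getLastD 0 ≤ M := PySem.List.max?_isMax hmax _ hLmem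
      omega
    have hB : gaps_penalty_alt slots ps pl = pvPairSum ps pl (d :: e') := by
      unfold gaps_penalty_alt
      rw [if_neg (by omega)]
      show (List.foldl (pvWalkBody hours ps pl) (0, 0)
          (PySem.List.pyRange ((PySem.List.min? (hours : List Int) (fun x => x)).getD 0 + 1)
            ((PySem.List.max? (hours : List Int) (fun x => x)).getD 0 + 1))).1
        = pvPairSum ps pl (d :: e')
      rw [hmin, hmax, hmd, hML]
      simp only [Option.getD_some]
      rw [pvWalk_main hours ps pl e' d 0 echain (by
        intro t ht
        rw [hcont t]
        constructor
        · intro h2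
          rcases List.mem_cons.mp h2 with h2 | h2
          · omega
          · exact h2
        · exact fun h2 => List.mem_cons_of_mem d h2)]
      simp
    rw [hA, hB, ← hddh]
    exact pvPairSum_pvDD ps pl h hchain
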